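-- pv_equiv track=rewrite | github.com/justicecanada/otto | django/text_extractor/utils.py | format_merged_file_name
-- ===== SOURCE A (Python) =====
-- def format_merged_file_name(file_names_to_merge, max_length=35):
--
--     # sort files by shortest name to longest name
--     file_names_to_merge.sort(key=len)
--
--     joined_file_names = ""
--     extra_files = 0
--     for file_name in file_names_to_merge:
--         if len(joined_file_names) + len(file_name) <= max_length:
--             joined_file_names += file_name + "_"
--         else:
--             extra_files += 1
--     joined_file_names = joined_file_names.rstrip("_")
--     if len(joined_file_names) == 0:
--         merged_file_name = (
--             f"Merged_{extra_files}_files" if extra_files > 1 else "Merged_1_file"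
--         )
--     elif extra_files > 0:
--         merged_file_name = f"Merged_{joined_file_names}_and_{extra_files}_more"
--     else:
--         merged_file_name = f"Merged_{joined_file_names}"
--     return merged_file_name
-- ===== SOURCE B (Python) =====
-- def format_merged_file_name(file_names_to_merge, max_length=35):
--     # Same in-place sort by length as A (side effect preserved).
--     file_names_to_merge.sort(key=len)
--     # Sorted ascending, so the files that fit form a prefix: find the cutoff.
--     running = 0
--     cutoff = len(file_names_to_merge)
--     for i, name in enumerate(file_names_to_merge):
--         if running + len(name) > max_length:
--             cutoff = i
--             break
--         running += len(name) + 1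
--     extra_files = len(file_names_to_merge) - cutoff
--     joined_file_names = "_".join(file_names_to_merge[:cutoff]).rstrip("_")
--     if len(joined_file_names) == 0:
--         return f"Merged_{extra_files}_files" if extra_files > 1 else "Merged_1_file"
--     elif extra_files > 0:
--         return f"Merged_{joined_file_names}_and_{extra_files}_more"
--     return f"Merged_{joined_file_names}"
-- ===== Notes on version B (the rewrite author's own statement) =====
-- stated objective: alternative
-- what changed: Instead of folding every file through an accumulating string with an else-branch counter, B exploits that the length-sorted list makes the fitting files a prefix: it finds the cutoff index with a running-length scan that breaks early, takes the prefix slice, joins it with '_'.join(...).rstrip('_'), and counts the extras as len(list)-cutoff.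
import Mathlib
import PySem

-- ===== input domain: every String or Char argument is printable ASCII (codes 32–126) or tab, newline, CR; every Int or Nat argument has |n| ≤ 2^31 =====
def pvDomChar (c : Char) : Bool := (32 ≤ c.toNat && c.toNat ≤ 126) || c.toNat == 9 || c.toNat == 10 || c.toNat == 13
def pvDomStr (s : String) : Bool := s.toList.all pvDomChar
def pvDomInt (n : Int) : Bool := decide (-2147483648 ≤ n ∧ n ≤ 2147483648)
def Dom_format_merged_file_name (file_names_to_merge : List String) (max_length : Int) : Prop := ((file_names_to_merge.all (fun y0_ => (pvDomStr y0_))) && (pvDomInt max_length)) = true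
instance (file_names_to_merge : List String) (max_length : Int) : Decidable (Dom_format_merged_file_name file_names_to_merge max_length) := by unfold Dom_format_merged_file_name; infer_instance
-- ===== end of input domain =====

-- B replaces A's accumulate-or-count fold by a cutoff scan over the length-sorted list
-- (the fitting files form a prefix), then slices, joins and counts the rest; same cost.
-- Both Pythons sort the argument list in place (same side effect); the theorems are about the return value.


-- hand port of Python's s.rstrip("_") (drop trailing '_' characters); exact for every string
def pvRstripU (s : List Char) : List Char := (s.reverse.dropWhile (fun c => c == '_')).reverse

-- shared transliteration of the final three-way formatting, literally identical in A and in B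
def pvFinish (joined : List Char) (extra : Int) : String :=
  if joined.length = 0 then
    if extra > 1 then String.ofList ("Merged_".toList ++ PySem.Int.toChars extra ++ "_files".toList)
    else "Merged_1_file"
  else if extra > 0 then
    String.ofList ("Merged_".toList ++ joined ++ "_and_".toList ++ PySem.Int.toChars extra ++ "_more".toList)
  else String.ofList ("Merged_".toList ++ joined)

-- ===== PORT A =====
-- A's loop body: accumulate file_name + "_" if it fits, else count it
def pvStepA (max_length : Int) (st : List Char × Int) (s : String) : List Char × Int :=
  if (st.1.length : Int) + (s.toList.length : Int) ≤ max_length then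
    (st.1 ++ s.toList ++ ['_'], st.2)
  else (st.1, st.2 + 1)

def format_merged_file_name (file_names_to_merge : List String) (max_length : Int) : String :=
  let sorted := PySem.List.sorted file_names_to_merge (fun s => s.toList.length)
  let st := sorted.foldl (pvStepA max_length) ([], 0)
  pvFinish (pvRstripU st.1) st.2

-- ===== PORT B =====
-- B's cutoff scan: length of the accepted prefix, breaking at the first file that does not fit
def pvCutB (max_length : Int) : List String → Int → Nat
  | [], _ => 0
  | s :: rest, running =>
    if running + (s.toList.length : Int) > max_length then 0
    else pvCutB max_length rest (running + (s.toList.length : Int) + 1) + 1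

def format_merged_file_name_alt (file_names_to_merge : List String) (max_length : Int) : String :=
  let sorted := PySem.List.sorted file_names_to_merge (fun s => s.toList.length)
  let cutoff := pvCutB max_length sorted 0
  let extra : Int := (sorted.length : Int) - (cutoff : Int)
  let joined := pvRstripU (PySem.Chars.join ['_'] ((sorted.take cutoff).map String.toList))
  pvFinish joined extra

-- ===== PRECONDITION & SPEC =====
def Spec_format_merged_file_name (file_names_to_merge : List String) (max_length : Int) (out : String) : Prop := out = format_merged_file_name_alt file_names_to_merge max_length
instance (file_names_to_merge : List String) (max_length : Int) (out : String) : Decidable (Spec_format_merged_file_name file_names_to_merge max_length out) := by unfold Spec_format_merged_file_name; infer_instance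

-- ===== CLAIM (what is proved, stated in full; the proofs are below) =====
def Claim_equal_format_merged_file_name : Prop := ∀ (file_names_to_merge : List String) (max_length : Int), Dom_format_merged_file_name file_names_to_merge max_length → Spec_format_merged_file_name file_names_to_merge max_length (format_merged_file_name file_names_to_merge max_length)

-- ===== LEMMAS AND PROOFS =====

-- once one file is too long, every (no shorter) later file is rejected: the fold only counts
theorem foldA_all_reject (m : Int) (l : List String) (j : List Char) (e : Int)
    (h : ∀ t ∈ l, (m : Int) < (j.length : Int) + (t.toList.length : Int)) :
    l.foldl (pvStepA m) (j, e) = (j, e + l.length) := by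
  induction l generalizing e with
  | nil => simp
  | cons s rest ih =>
    have hs := h s (by simp)
    simp only [List.foldl_cons, pvStepA, if_neg (by omega : ¬ ((j.length : Int) + (s.toList.length : Int) ≤ m))]
    rw [ih (e + 1) (fun t ht => h t (by simp [ht]))]
    simp only [Prod.mk.injEq, List.length_cons]
    refine ⟨trivial, by push_cast; ring⟩

-- on a list with nondecreasing lengths, A's fold keeps exactly the pvCutB-prefix and counts the rest
theorem foldA_eq_cut (m : Int) (l : List String)
    (hp : l.Pairwise (fun a b => a.toList.length ≤ b.toList.length)) :
    ∀ (j : List Char) (e : Int),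
    l.foldl (pvStepA m) (j, e) =
      (j ++ (l.take (pvCutB m l (j.length : Int))).flatMap (fun s => s.toList ++ ['_']),
       e + ((l.length : Int) - (pvCutB m l (j.length : Int) : Int))) := by
  induction l with
  | nil => intro j e; simp [pvCutB]
  | cons s rest ih =>
    intro j e
    rcases List.pairwise_cons.mp hp with ⟨hhd, hrest⟩
    by_cases h : (j.length : Int) + (s.toList.length : Int) ≤ m
    · have hcut : pvCutB m (s :: rest) (j.length : Int)
          = pvCutB m rest ((j.length : Int) + (s.toList.length : Int) + 1) + 1 := by
        simp only [pvCutB]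
        rw [if_neg (by omega : ¬ ((j.length : Int) + (s.toList.length : Int) > m))]
      rw [hcut]
      simp only [List.foldl_cons, pvStepA, if_pos h]
      rw [ih hrest (j ++ s.toList ++ ['_']) e]
      have hlen : (((j ++ s.toList ++ ['_']).length : Int))
          = (j.length : Int) + (s.toList.length : Int) + 1 := by
        simp; ring
      rw [hlen]
      simp only [Prod.mk.injEq, List.length_cons, List.take_succ_cons, List.flatMap_cons]
      refine ⟨by simp, by push_cast; ring⟩
    · have hcut : pvCutB m (s :: rest) (j.length : Int) = 0 := by
        simp only [pvCutB]
        rw [if_pos (by omega : (j.length : Int) + (s.toList.length : Int) > m)]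
      rw [hcut]
      simp only [List.foldl_cons, pvStepA, if_neg h]
      rw [foldA_all_reject m rest j (e + 1)
        (fun t ht => by have := hhd t ht; push_cast at *; omega)]
      simp only [Prod.mk.injEq, List.length_cons, List.take_zero, List.flatMap_nil]
      refine ⟨by simp, by push_cast; ring⟩

theorem pvRstripU_append_underscore (x : List Char) :
    pvRstripU (x ++ ['_']) = pvRstripU x := by
  simp [pvRstripU]

theorem flatMap_eq_join_append (l : List (List Char)) (hne : l ≠ []) :
    l.flatMap (fun s => s ++ ['_']) = PySem.Chars.join ['_'] l ++ ['_'] := by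
  induction l with
  | nil => exact absurd rfl hne
  | cons p rest ih =>
    cases rest with
    | nil => simp [PySem.Chars.join_singleton]
    | cons q rs =>
      rw [List.flatMap_cons, ih (by simp), PySem.Chars.join_cons_cons]
      simp

theorem rstrip_flatMap_eq_rstrip_join (l : List (List Char)) :
    pvRstripU (l.flatMap (fun s => s ++ ['_'])) = pvRstripU (PySem.Chars.join ['_'] l) := by
  cases l with
  | nil => simp [PySem.Chars.join_nil]
  | cons p rest =>
    rw [flatMap_eq_join_append _ (by simp), pvRstripU_append_underscore]

-- ===== VERDICT (by name: the statement is the Claim_ definition above) =====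
theorem format_merged_file_name_spec : Claim_equal_format_merged_file_name := by
  intro xs m _
  unfold Spec_format_merged_file_name format_merged_file_name format_merged_file_name_alt
  dsimp only
  have hp := PySem.List.sorted_pairwise xs (fun s => s.toList.length)
  set l := PySem.List.sorted xs (fun s => s.toList.length) with hl
  rw [foldA_eq_cut m l hp [] 0]
  simp only [List.length_nil, Nat.cast_zero, zero_add]
  congr 1
  · rw [← rstrip_flatMap_eq_rstrip_join]
    congr 1
    rw [List.flatMap_map]
    simp
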